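-- pv_equiv track=rewrite | github.com/ETH-DISCO/cue-detr | model/cue_detr_eval.py | group_fixed_size
-- ===== SOURCE A (Python) =====
-- def group_fixed_size(frames: list[int], w: int):
--     """
--     Group `frames` into clusters that are `w` wide. Clusters are returned as nested lists.
--
--     Args:
--         frames: required to be sorted
--         w: width of clusters
--     """
--     assert len(frames) > 1, 'No frames to group'
--
--     prev = frames[0]
--     cluster = [prev]
--
--     for f in frames[1:]:
--         if f - prev <= w:
--             cluster.append(f)
--         else:
--             yield cluster
--             cluster = [f]
--             prev = f
--     if cluster:
--         yield cluster
-- ===== SOURCE B (Python) =====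
-- def group_fixed_size(frames: list[int], w: int):
--     """
--     Group `frames` into clusters that are `w` wide. Clusters are returned as nested lists.
--
--     Args:
--         frames: required to be sorted
--         w: width of clusters
--     """
--     assert len(frames) > 1, 'No frames to group'
--
--     n = len(frames)
--     i = 0
--     while i < n:
--         # advance j to the end of the cluster anchored at frames[i]
--         j = i + 1
--         while j < n and frames[j] - frames[i] <= w:
--             j += 1
--         yield frames[i:j]
--         i = j
-- ===== Notes on version B (the rewrite author's own statement) =====
-- stated objective: alternative
-- what changed: B replaces A's single pass with a running cluster list, prev anchor and reset by a two-index span scan: advance j past every frame within w of the anchor frames[i], yield the slice frames[i:j], and restart at i = j; no cluster accumulator is maintained.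
import Mathlib
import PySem

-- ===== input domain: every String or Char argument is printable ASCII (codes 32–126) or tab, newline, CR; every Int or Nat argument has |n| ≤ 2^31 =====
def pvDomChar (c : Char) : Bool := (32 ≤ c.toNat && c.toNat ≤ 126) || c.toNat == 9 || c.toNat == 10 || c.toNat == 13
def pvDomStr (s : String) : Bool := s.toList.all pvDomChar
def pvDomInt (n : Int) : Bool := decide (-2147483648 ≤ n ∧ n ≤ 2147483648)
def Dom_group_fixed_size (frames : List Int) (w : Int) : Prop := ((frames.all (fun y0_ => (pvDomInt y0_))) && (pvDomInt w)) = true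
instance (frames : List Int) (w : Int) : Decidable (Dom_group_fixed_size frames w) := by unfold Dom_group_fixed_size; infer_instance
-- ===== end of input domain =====

-- B replaces A's running cluster/prev/reset accumulator by a two-index span scan that
-- yields slices frames[i:j] (objective: alternative decomposition, same O(n) cost).

-- ===== PORT A =====
-- A's loop state: (prev = cluster anchor, current cluster, clusters already yielded).
def pvStepA (w : Int) (s : Int × List Int × List (List Int)) (f : Int) :
    Int × List Int × List (List Int) :=
  if f - s.1 ≤ w then (s.1, s.2.1 ++ [f], s.2.2)
  else (f, [f], s.2.2 ++ [s.2.1])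

def group_fixed_size (frames : List Int) (w : Int) : List (List Int) :=
  match frames with
  | [] => []          -- assert fails in Python (excluded by Pre_)
  | prev :: rest =>
    let s := rest.foldl (pvStepA w) (prev, [prev], [])
    if s.2.1 = [] then s.2.2 else s.2.2 ++ [s.2.1]

-- ===== PORT B =====
-- inner while: 'while j < n and frames[j] - frames[i] <= w: j += 1' (p = frames[i]).
-- frames.getD j 0 is exact for Python's frames[j] here: the loop only reads 0 ≤ j < n.
def pvInner (frames : List Int) (w p : Int) (n : Nat) (j : Nat) : Nat :=
  if j < n then
    if frames.getD j 0 - p ≤ w then pvInner frames w p n (j + 1) else j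
  else j
termination_by n - j

-- needed by pvOuter's termination: the inner while never moves j backwards
theorem pvInner_ge (frames : List Int) (w p : Int) (n : Nat) :
    ∀ j, j ≤ pvInner frames w p n j := by
  intro j
  induction hf : n - j using Nat.strong_induction_on generalizing j with
  | _ fuel ih =>
    rw [pvInner]
    split
    · split
      · exact le_trans (Nat.le_succ j) (ih (n - (j + 1)) (by omega) (j + 1) rfl)
      · exact le_refl j
    · exact le_refl j

-- outer while: 'while i < n: j = …; yield frames[i:j]; i = j'
def pvOuter (frames : List Int) (w : Int) (n i : Nat) : List (List Int) :=
  if h : i < n then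
    let j := pvInner frames w (frames.getD i 0) n (i + 1)
    PySem.List.slice frames (some (i : Int)) (some (j : Int)) :: pvOuter frames w n j
  else []
termination_by n - i
decreasing_by
  have := pvInner_ge frames w (frames.getD i 0) n (i + 1)
  omega

def group_fixed_size_alt (frames : List Int) (w : Int) : List (List Int) :=
  pvOuter frames w frames.length 0

-- ===== PRECONDITION & SPEC =====
-- Python A's assert raises AssertionError unless len(frames) > 1.
def Pre_group_fixed_size (frames : List Int) (w : Int) : Prop := 1 < frames.length
instance (frames : List Int) (w : Int) : Decidable (Pre_group_fixed_size frames w) := by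
  unfold Pre_group_fixed_size; infer_instance

def pvWitness_group_fixed_size : List Int × Int := ([1, 2, 10], 3)

def Spec_group_fixed_size (frames : List Int) (w : Int) (out : List (List Int)) : Prop := out = group_fixed_size_alt frames w
instance (frames : List Int) (w : Int) (out : List (List Int)) : Decidable (Spec_group_fixed_size frames w out) := by unfold Spec_group_fixed_size; infer_instance

-- ===== CLAIM (what is proved, stated in full; the proofs are below) =====
def Claim_equal_group_fixed_size : Prop := ∀ (frames : List Int) (w : Int), Dom_group_fixed_size frames w → Pre_group_fixed_size frames w → Spec_group_fixed_size frames w (group_fixed_size frames w)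

-- ===== LEMMAS AND PROOFS =====

-- Intermediate structural form of the grouping: peel one cluster with a take-while.
def pvWhileB (w p : Int) (cluster : List Int) : List Int → List Int × List Int
  | [] => (cluster, [])
  | f :: fs => if f - p ≤ w then pvWhileB w p (cluster ++ [f]) fs else (cluster, f :: fs)

theorem pvWhileB_len (w p : Int) (cluster : List Int) (l : List Int) :
    (pvWhileB w p cluster l).2.length ≤ l.length := by
  induction l generalizing cluster with
  | nil => simp [pvWhileB]
  | cons f fs ih =>
    simp only [pvWhileB]
    split
    · exact Nat.le_succ_of_le (ih _)
    · simp

def pvClustersB (w : Int) : List Int → List (List Int)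
  | [] => []
  | p :: rest =>
    let s := pvWhileB w p [p] rest
    s.1 :: pvClustersB w s.2
termination_by fs => fs.length
decreasing_by
  exact Nat.lt_succ_of_le (pvWhileB_len w p [p] rest)

-- pvWhileB is take-while / drop-while
theorem pvWhileB_eq (w p : Int) (l : List Int) : ∀ cluster,
    pvWhileB w p cluster l =
      (cluster ++ l.takeWhile (fun f => decide (f - p ≤ w)),
       l.dropWhile (fun f => decide (f - p ≤ w))) := by
  induction l with
  | nil => intro c; simp [pvWhileB]
  | cons f fs ih =>
    intro c
    by_cases h : f - p ≤ w
    · rw [pvWhileB, if_pos h, ih, List.takeWhile_cons_of_pos (by simpa using h),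
        List.dropWhile_cons_of_pos (by simpa using h)]
      simp
    · rw [pvWhileB, if_neg h, List.takeWhile_cons_of_neg (by simpa using h),
        List.dropWhile_cons_of_neg (by simpa using h)]
      simp

-- take/drop at the take-while boundary
theorem take_drop_takeWhile {α : Type} (q : α → Bool) (l : List α) :
    l.take (l.takeWhile q).length = l.takeWhile q ∧
      l.drop (l.takeWhile q).length = l.dropWhile q := by
  induction l with
  | nil => simp
  | cons a l ih =>
    by_cases h : q a
    · simpa [List.takeWhile_cons, List.dropWhile_cons, h] using ih
    · simp [List.takeWhile_cons, List.dropWhile_cons, h]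

-- A's fold from state (prev, cluster, acc) yields acc, then the cluster closed by
-- the take-while, then the clusters of the remainder.
theorem foldA_eq (w : Int) (rest : List Int) :
    ∀ (prev : Int) (cluster : List Int) (acc : List (List Int)), cluster ≠ [] →
    (let s := rest.foldl (pvStepA w) (prev, cluster, acc)
     if s.2.1 = [] then s.2.2 else s.2.2 ++ [s.2.1]) =
      acc ++ (pvWhileB w prev cluster rest).1 :: pvClustersB w (pvWhileB w prev cluster rest).2 := by
  induction rest with
  | nil =>
    intro prev cluster acc hc
    simp [pvWhileB, pvClustersB, hc]
  | cons f fs ih =>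
    intro prev cluster acc hc
    by_cases h : f - prev ≤ w
    · simpa [pvWhileB, h, pvStepA] using ih prev (cluster ++ [f]) acc (by simp)
    · have h2 := ih f [f] (acc ++ [cluster]) (by simp)
      simp only [List.foldl_cons, pvStepA, pvWhileB, if_neg h]
      rw [h2]
      simp [pvClustersB]

-- the inner while lands exactly at the take-while boundary
theorem pvInner_eq (frames : List Int) (w p : Int) :
    ∀ j, pvInner frames w p frames.length j =
      j + ((frames.drop j).takeWhile (fun f => decide (f - p ≤ w))).length := by
  intro j
  induction hf : frames.length - j using Nat.strong_induction_on generalizing j with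
  | _ fuel ih =>
    rw [pvInner]
    by_cases hj : j < frames.length
    · have hd : frames.drop j = frames[j] :: frames.drop (j + 1) :=
        List.drop_eq_getElem_cons hj
      have hg : frames.getD j 0 = frames[j] := List.getD_eq_getElem frames 0 hj
      by_cases hb : frames[j] - p ≤ w
      · rw [if_pos hj, if_pos (by rw [hg]; exact hb),
          ih (frames.length - (j + 1)) (by omega) (j + 1) rfl, hd,
          List.takeWhile_cons_of_pos (by simpa using hb)]
        simp only [List.length_cons]
        omega
      · rw [if_pos hj, if_neg (by rw [hg]; exact hb), hd,
          List.takeWhile_cons_of_neg (by simpa using hb)]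
        simp
    · rw [if_neg hj]
      rw [List.drop_eq_nil_of_le (by omega)]
      simp

-- the outer while from index i computes the structural clusters of the suffix
theorem pvOuter_eq (frames : List Int) (w : Int) :
    ∀ i, pvOuter frames w frames.length i = pvClustersB w (frames.drop i) := by
  intro i
  induction hf : frames.length - i using Nat.strong_induction_on generalizing i with
  | _ fuel ih =>
    rw [pvOuter]
    by_cases hi : i < frames.length
    · rw [dif_pos hi]
      have hd : frames.drop i = frames[i] :: frames.drop (i + 1) :=
        List.drop_eq_getElem_cons hi
      have hg : frames.getD i 0 = frames[i] := List.getD_eq_getElem frames 0 hi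
      set p := frames[i] with hp
      set t := (frames.drop (i + 1)).takeWhile (fun f => decide (f - p ≤ w)) with ht
      have hj : pvInner frames w (frames.getD i 0) frames.length (i + 1)
          = (i + 1) + t.length := by rw [hg, pvInner_eq]
      have htlen : t.length ≤ frames.length - (i + 1) := by
        have h1 := (List.takeWhile_prefix (l := frames.drop (i + 1))
            (fun f => decide (f - p ≤ w))).length_le
        rw [List.length_drop] at h1
        rw [← ht] at h1
        exact h1
      -- the slice is the peeled cluster
      have hslice : PySem.List.slice frames (some (i : Int))
          (some (((i + 1) + t.length : Nat) : Int)) = p :: t := by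
        rw [PySem.List.slice_natCast]
        rw [hd]
        have : (i + 1) + t.length - i = t.length + 1 := by omega
        rw [this]
        simp [List.take_succ_cons]
        exact (take_drop_takeWhile _ _).1
      -- the rest after the slice is the drop-while remainder
      have hdrop : frames.drop ((i + 1) + t.length)
          = (frames.drop (i + 1)).dropWhile (fun f => decide (f - p ≤ w)) := by
        rw [← List.drop_drop]
        exact (take_drop_takeWhile _ _).2
      rw [hj]
      show PySem.List.slice frames (some (i : Int)) (some (((i + 1) + t.length : Nat) : Int))
            :: pvOuter frames w frames.length ((i + 1) + t.length)
          = pvClustersB w (frames.drop i)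
      rw [hslice, ih (frames.length - ((i + 1) + t.length)) (by omega) _ rfl, hdrop,
        hd]
      rw [pvClustersB, pvWhileB_eq, ← ht]
      simp only [List.singleton_append]
    · rw [dif_neg hi, List.drop_eq_nil_of_le (by omega), pvClustersB]

-- ===== VERDICT (by name: the statement is the Claim_ definition above) =====
theorem group_fixed_size_spec : Claim_equal_group_fixed_size := by
  intro frames w _ hpre
  unfold Spec_group_fixed_size group_fixed_size group_fixed_size_alt
  rw [pvOuter_eq frames w 0, List.drop_zero]
  match frames with
  | [] => simp [Pre_group_fixed_size] at hpre
  | prev :: rest =>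
    simpa [pvClustersB] using foldA_eq w rest prev [prev] [] (by simp)
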